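-- pv_equiv track=rewrite | github.com/pypi-data/pypi-mirror-344 | packages/otauto/otauto-0.7.6-py3-none-any.whl/otauto/data_cleansing.py | message_to_log
-- ===== SOURCE A (Python) =====
-- def message_to_log(word_dict: dict, items_per_line: int = 3):
--     """
--     # 记录日志
--     logger.success(f"dic_word_ocr:\n{formatted_dict}")
--     将字典或列表转换为字符串,并按每行指定数量进行换行
--     :param word_dict: 字典或列表
--     :param items_per_line: 换行的键值对数目
--     :return: 格式化后的字符串
--     """
--     if word_dict is None:
--         return ""
--
--     formatted_items = []
--
--     if isinstance(word_dict, dict):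
--         # 获取字典的键值对列表
--         items = list(word_dict.items())
--         # 分割成每行指定数量的键值对
--         for i in range(0, len(items), items_per_line):
--             formatted_items.append(', '.join([f"{k}: {v}" for k, v in items[i:i + items_per_line]]))
--
--     elif isinstance(word_dict, list):
--         # 分割列表并格式化
--         for i in range(0, len(word_dict), items_per_line):
--             formatted_items.append(', '.join([str(item) for item in word_dict[i:i + items_per_line]]))
--
--     # 将分割后的内容连接成多行字符串
--     formatted_dict = '\n'.join(formatted_items)
--     return formatted_dict
-- ===== SOURCE B (Python) =====
-- def message_to_log(word_dict: dict, items_per_line: int = 3):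
--     """Single incremental pass: build the output string directly, choosing the
--     separator ('\\n' at chunk boundaries, ', ' inside a chunk) from the running
--     item index; no slicing, no intermediate list of lines."""
--     if isinstance(word_dict, dict):
--         items = [f"{k}: {v}" for k, v in word_dict.items()]
--     elif isinstance(word_dict, list):
--         items = [str(x) for x in word_dict]
--     else:
--         return ""
--     out = ""
--     for idx, s in enumerate(items):
--         if idx == 0:
--             out = s
--         elif idx % items_per_line == 0:
--             out += "\n" + s
--         else:
--             out += ", " + s
--     return out
-- ===== Notes on version B (the rewrite author's own statement) =====
-- stated objective: alternative
-- what changed: Replaces A's chunk-slicing loops (range stepping, slice, per-chunk join, final join) with one incremental pass over enumerate(items) that appends each item to a single growing string, picking '\n' or ', ' from idx % items_per_line.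
-- outside the precondition, e.g. on message_to_log({'a': '1', 'b': '2'}, -1): A returns '', B returns 'a: 1\nb: 2'; on message_to_log({'a': '1'}, 0): A raises ValueError, B returns 'a: 1'
import Mathlib
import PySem

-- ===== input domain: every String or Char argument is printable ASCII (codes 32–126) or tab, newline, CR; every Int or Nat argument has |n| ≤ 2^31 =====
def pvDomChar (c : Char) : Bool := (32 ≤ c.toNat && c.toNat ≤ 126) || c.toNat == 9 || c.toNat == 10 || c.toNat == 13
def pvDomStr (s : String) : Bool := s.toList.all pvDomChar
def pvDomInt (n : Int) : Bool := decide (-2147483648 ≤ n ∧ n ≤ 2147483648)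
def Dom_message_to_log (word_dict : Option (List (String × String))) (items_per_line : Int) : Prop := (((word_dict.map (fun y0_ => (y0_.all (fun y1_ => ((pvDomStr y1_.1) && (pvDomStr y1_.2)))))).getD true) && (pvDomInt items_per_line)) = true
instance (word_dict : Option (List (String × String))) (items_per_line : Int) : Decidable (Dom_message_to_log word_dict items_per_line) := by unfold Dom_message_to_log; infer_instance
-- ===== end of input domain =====

-- B replaces A's chunk-slicing loops with one incremental pass over enumerated items choosing each separator from the index (objective: alternative).


-- ===== PORT A =====
def message_to_log (word_dict : Option (List (String × String))) (items_per_line : Int) : String :=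
  match word_dict with
  | none => ""
  | some d =>
    -- items = list(word_dict.items())
    let items := (PySem.Dict.ofList d).items
    -- for i in range(0, len(items), items_per_line): formatted_items.append(', '.join([f"{k}: {v}" …]))
    let formatted_items := (PySem.List.pyRange 0 items.length items_per_line).foldl
      (fun acc i => acc ++ [PySem.Str.join ", "
        ((PySem.List.slice items (some i) (some (i + items_per_line))).map
          (fun kv => kv.1 ++ ": " ++ kv.2))]) []
    PySem.Str.join "\n" formatted_items

-- ===== PORT B =====
def message_to_log_alt (word_dict : Option (List (String × String))) (items_per_line : Int) : String :=
  match word_dict with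
  | none => ""
  | some d =>
    -- items = [f"{k}: {v}" for k, v in word_dict.items()]
    let items := (PySem.Dict.ofList d).items.map (fun kv => kv.1 ++ ": " ++ kv.2)
    -- for idx, s in enumerate(items): out = s / out += "\n"+s / out += ", "+s
    (PySem.List.enumerate items 0).foldl
      (fun out p =>
        if p.1 == 0 then p.2
        else if PySem.Int.mod p.1 items_per_line == 0 then out ++ "\n" ++ p.2
        else out ++ ", " ++ p.2) ""

-- ===== PRECONDITION & SPEC =====
-- Pre_ excludes non-positive items_per_line with a present dict: there A raises ValueError (items_per_line = 0, range step 0)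
-- or returns "" from an empty range (items_per_line < 0, an unspecified corner where B's index-driven grouping is equally defensible);
-- the empty dict with a negative chunk size stays inside (both return "").
def Pre_message_to_log (word_dict : Option (List (String × String))) (items_per_line : Int) : Prop :=
  word_dict = none ∨ 1 ≤ items_per_line ∨ (word_dict = some [] ∧ items_per_line ≠ 0)
instance (word_dict : Option (List (String × String))) (items_per_line : Int) : Decidable (Pre_message_to_log word_dict items_per_line) := by unfold Pre_message_to_log; infer_instance
def pvWitness_message_to_log : (Option (List (String × String))) × Int := (some [("a", "1"), ("b", "2")], 3)

def Spec_message_to_log (word_dict : Option (List (String × String))) (items_per_line : Int) (out : String) : Prop := out = message_to_log_alt word_dict items_per_line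
instance (word_dict : Option (List (String × String))) (items_per_line : Int) (out : String) : Decidable (Spec_message_to_log word_dict items_per_line out) := by unfold Spec_message_to_log; infer_instance

-- ===== CLAIM (what is proved, stated in full; the proofs are below) =====
def Claim_equal_message_to_log : Prop := ∀ (word_dict : Option (List (String × String))) (items_per_line : Int), Dom_message_to_log word_dict items_per_line → Pre_message_to_log word_dict items_per_line → Spec_message_to_log word_dict items_per_line (message_to_log word_dict items_per_line)

-- ===== LEMMAS AND PROOFS =====

-- the string B's loop appends after the first item, starting at index i
def sepCat (k : Int) : Int → List String → String
  | _, [] => ""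
  | i, s :: rest => (if PySem.Int.mod i k == 0 then "\n" else ", ") ++ s ++ sepCat k (i + 1) rest
def commaCat : List String → String
  | [] => ""
  | s :: rest => ", " ++ s ++ commaCat rest

theorem foldl_enum_sepCat (k : Int) (rest : List String) :
    ∀ (i : Int) (acc : String), 1 ≤ i →
    (PySem.List.enumerate rest i).foldl
      (fun out p =>
        if p.1 == 0 then p.2
        else if PySem.Int.mod p.1 k == 0 then out ++ "\n" ++ p.2
        else out ++ ", " ++ p.2) acc = acc ++ sepCat k i rest := by
  induction rest with
  | nil => intro i acc _; simp [PySem.List.enumerate, sepCat]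
  | cons s t ih =>
    intro i acc hi
    rw [PySem.List.enumerate_cons, List.foldl_cons, ih (i+1) _ (by omega)]
    have h0 : (i == (0:Int)) = false := by simp; omega
    simp only [h0, sepCat, if_false, Bool.false_eq_true]
    by_cases h : PySem.Int.mod i k == 0 <;> simp [h, String.append_assoc]

theorem sepCat_period (k : Int) (hk : 0 < k) (rest : List String) :
    ∀ i, sepCat k (i + k) rest = sepCat k i rest := by
  induction rest with
  | nil => intro i; rfl
  | cons s t ih =>
    intro i
    have hm : PySem.Int.mod (i + k) k = PySem.Int.mod i k := by
      rw [PySem.Int.mod_eq_emod_of_pos hk, PySem.Int.mod_eq_emod_of_pos hk]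
      exact Int.add_emod_right i k
    have : i + k + 1 = (i + 1) + k := by ring
    simp only [sepCat, hm, this, ih]

theorem sepCat_append (k : Int) (c : List String) :
    ∀ (r : List String) (i : Int), sepCat k i (c ++ r) = sepCat k i c ++ sepCat k (i + c.length) r := by
  induction c with
  | nil => intro r i; simp [sepCat]
  | cons s t ih =>
    intro r i
    simp only [List.cons_append, sepCat, ih, List.length_cons, String.append_assoc]
    congr 3
    push_cast; ring_nf

theorem sepCat_commas (k : Int) (hk : 0 < k) (c : List String) :
    ∀ (i : Int), 1 ≤ i → i + c.length ≤ k → sepCat k i c = commaCat c := by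
  induction c with
  | nil => intro i _ _; rfl
  | cons s t ih =>
    intro i hi hlen
    have hik : i < k := by simp at hlen; omega
    have hm : (PySem.Int.mod i k == 0) = false := by
      rw [PySem.Int.mod_eq_emod_of_pos hk, Int.emod_eq_of_lt (by omega) hik]
      simp; omega
    simp only [sepCat, hm, if_false, commaCat, Bool.false_eq_true]
    rw [ih (i+1) (by omega) (by simp at hlen ⊢; omega)]

theorem strJoin_cons_cons (sep p q : String) (rest : List String) :
    PySem.Str.join sep (p :: q :: rest) = p ++ sep ++ PySem.Str.join sep (q :: rest) := by
  apply String.toList_inj.mp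
  simp [PySem.Str.toList_join, PySem.Chars.join_cons_cons, String.toList_append]

theorem strJoin_singleton (sep p : String) : PySem.Str.join sep [p] = p := by
  apply String.toList_inj.mp
  simp [PySem.Str.toList_join, PySem.Chars.join_singleton]

theorem strJoin_commaCat (x : String) (c : List String) :
    PySem.Str.join ", " (x :: c) = x ++ commaCat c := by
  induction c generalizing x with
  | nil => simp [strJoin_singleton, commaCat]
  | cons s t ih =>
    rw [strJoin_cons_cons, ih, commaCat, String.append_assoc, String.append_assoc]

def chunkLines (k' : Nat) : List String → List String
  | [] => []
  | x :: rest => PySem.Str.join ", " (x :: rest.take k') :: chunkLines k' (rest.drop k')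
  termination_by l => l.length
  decreasing_by simp [List.length_drop]

theorem canon_eq_chunks (k : Int) (hk : 1 ≤ k) :
    ∀ (L : List String), (match L with
      | [] => ""
      | x :: rest => x ++ sepCat k 1 rest) = PySem.Str.join "\n" (chunkLines (k.toNat - 1) L) := by
  intro L
  induction hL : L.length using Nat.strong_induction_on generalizing L with
  | _ n ih =>
  match L with
  | [] =>
    apply String.toList_inj.mp
    simp [chunkLines, PySem.Str.toList_join, PySem.Chars.join_nil]
  | x :: rest =>
    show x ++ sepCat k 1 rest = _
    have hkk : ((k.toNat - 1 : Nat) : Int) + 1 = k := by omega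
    have hsplit : rest = rest.take (k.toNat - 1) ++ rest.drop (k.toNat - 1) := by simp
    rw [show sepCat k 1 rest = sepCat k 1 (rest.take (k.toNat - 1) ++ rest.drop (k.toNat - 1)) by rw [← hsplit]]
    rw [sepCat_append]
    rw [sepCat_commas k (by omega) _ 1 (by omega)
        (by have := List.length_take_le (k.toNat - 1) rest; simp; omega)]
    rcases hdrop : rest.drop (k.toNat - 1) with _ | ⟨y, r'⟩
    · -- single chunk
      simp only [sepCat, String.append_empty]
      rw [chunkLines, hdrop, chunkLines, strJoin_singleton, strJoin_commaCat]
    · -- boundary: index 1 + |take| = k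
      have hlen : (rest.take (k.toNat - 1)).length = k.toNat - 1 := by
        rw [List.length_take]
        have : k.toNat - 1 ≤ rest.length := by
          by_contra h
          rw [List.drop_eq_nil_of_le (by omega)] at hdrop
          exact (List.cons_ne_nil y r') hdrop.symm
        omega
      have hidx : (1 : Int) + (rest.take (k.toNat - 1)).length = k := by rw [hlen]; omega
      rw [hidx]
      have hper : sepCat k k (y :: r') = "\n" ++ (y ++ sepCat k 1 r') := by
        have hmod : (PySem.Int.mod k k == 0) = true := by
          rw [PySem.Int.mod_eq_emod_of_pos (by omega)]; simp
        simp only [sepCat, hmod, if_true]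
        have : sepCat k (k + 1) r' = sepCat k 1 r' := by
          have := sepCat_period k (by omega) r' 1
          rw [show k + 1 = 1 + k by ring, this]
        rw [this, String.append_assoc]
      rw [hper]
      -- IH on y :: r'
      have hlt : (y :: r').length < n := by
        subst hL
        have := List.length_drop (l := rest) (i := k.toNat - 1)
        rw [hdrop] at this
        simp at this ⊢
        omega
      have IH := ih _ hlt (y :: r') rfl
      simp only at IH
      rw [chunkLines, hdrop]
      rcases hc : chunkLines (k.toNat - 1) (y :: r') with _ | ⟨c0, cs⟩
      · rw [chunkLines] at hc; simp at hc
      · rw [hc] at IH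
        rw [strJoin_cons_cons, strJoin_commaCat, ← IH]
        simp [String.append_assoc]

theorem pyRange_pos_cons (b s : Int) (hb : 0 < b) (hs : 0 < s) :
    PySem.List.pyRange 0 b s = 0 :: PySem.List.pyRange s b s := by
  rw [PySem.List.pyRange_of_pos 0 b hs, PySem.List.pyRange_of_pos s b hs, if_pos hb]
  have hm : ((b - 0 + s - 1) / s).toNat = (if s < b then ((b - s + s - 1) / s).toNat else 0) + 1 := by
    by_cases h : s < b
    · simp only [h, if_true]
      have : b - 0 + s - 1 = (b - s + s - 1) + 1 * s := by ring
      rw [this, Int.add_mul_ediv_right _ _ (by omega)]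
      have h1 : 0 ≤ (b - s + s - 1) / s := Int.ediv_nonneg (by omega) (by omega)
      omega
    · simp only [h, if_false]
      have h1 : 1 ≤ (b - 0 + s - 1) / s := by rw [Int.le_ediv_iff_mul_le hs]; omega
      have h2 : (b - 0 + s - 1) / s < 2 := by rw [Int.ediv_lt_iff_lt_mul hs]; omega
      omega
  rw [hm, List.range_succ_eq_map]
  simp only [List.map_cons, List.map_map]
  congr 1
  · simp
  · apply List.map_congr_left; intro j _; simp [Function.comp]; ring

theorem pyRange_pos_shift (b s : Int) (hs : 0 < s) :
    PySem.List.pyRange s b s = (PySem.List.pyRange 0 (b - s) s).map (· + s) := by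
  rw [PySem.List.pyRange_of_pos s b hs, PySem.List.pyRange_of_pos 0 (b - s) hs, List.map_map]
  have hcnt : b - s - 0 + s - 1 = b - s + s - 1 := by ring
  by_cases h : s < b
  · rw [if_pos h, if_pos (by omega : (0:Int) < b - s), hcnt]
    apply List.map_congr_left; intro j _; simp [Function.comp]; ring
  · rw [if_neg h, if_neg (by omega : ¬ (0:Int) < b - s)]
    simp

theorem map_chunks (k : Int) (hk : 1 ≤ k) :
    ∀ (L : List String),
    (PySem.List.pyRange 0 (L.length : Int) k).map
      (fun i => PySem.Str.join ", " (PySem.List.slice L (some i) (some (i + k))))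
      = chunkLines (k.toNat - 1) L := by
  intro L
  induction hL : L.length using Nat.strong_induction_on generalizing L with
  | _ n ih =>
  match L with
  | [] =>
    subst hL
    rw [PySem.List.pyRange_of_pos 0 _ (by omega : (0:Int) < k), if_neg (by simp)]
    simp [chunkLines]
  | x :: rest =>
    subst hL
    have hb : (0:Int) < ((x :: rest).length : Int) := by simp
    rw [pyRange_pos_cons _ _ hb (by omega), List.map_cons, pyRange_pos_shift _ _ (by omega), List.map_map]
    rw [chunkLines]
    congr 1
    · -- head chunk
      rw [PySem.List.slice_zero_start, PySem.List.slice_to _ (by omega : (0:Int) ≤ 0 + k),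
          show ((0:Int) + k).toNat = (k.toNat - 1) + 1 by omega, List.take_succ_cons]
    · -- tail chunks
      have hdd : List.drop (k.toNat - 1) rest = List.drop k.toNat (x :: rest) := by
        rw [show List.drop k.toNat (x :: rest) = List.drop (k.toNat - 1 + 1) (x :: rest) by congr 1; omega]
        simp [List.drop_succ_cons]
      by_cases hc : (k : Int) ≤ ((x :: rest).length : Int)
      · have hlen : ((List.drop (k.toNat - 1) rest).length : Int) = ((x :: rest).length : Int) - k := by
          rw [hdd, List.length_drop]; omega
        have hcongr : ((PySem.List.pyRange 0 (((x :: rest).length : Int) - k) k).map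
            ((fun i => PySem.Str.join ", " (PySem.List.slice (x :: rest) (some i) (some (i + k)))) ∘ (· + k)))
            = (PySem.List.pyRange 0 (((List.drop (k.toNat - 1) rest).length : Int)) k).map
            (fun i => PySem.Str.join ", " (PySem.List.slice (List.drop (k.toNat - 1) rest) (some i) (some (i + k)))) := by
          rw [hlen]
          apply List.map_congr_left
          intro j hj
          have hj0 : 0 ≤ j := ((PySem.List.mem_pyRange_iff_of_pos (by omega) j).mp hj).1
          simp only [Function.comp]
          congr 1
          rw [PySem.List.slice_toNat _ (by omega) (by omega), PySem.List.slice_toNat _ (by omega) (by omega), hdd,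
              List.drop_drop]
          congr 1
          · omega
          · congr 1; omega
        rw [hcongr, ih ((List.drop (k.toNat - 1) rest).length) (by rw [hdd, List.length_drop]; omega) _ rfl]
      · -- k exceeds the length: both sides empty
        have h1 : PySem.List.pyRange 0 (((x :: rest).length : Int) - k) k = [] := by
          rw [PySem.List.pyRange_of_pos _ _ (by omega), if_neg (by omega)]; rfl
        have h2 : List.drop (k.toNat - 1) rest = [] := List.drop_eq_nil_of_le (by simp at hc ⊢; omega)
        rw [h1, h2]; simp [chunkLines]

theorem slice_map_comm {α β : Type} (f : α → β) (xs : List α) (a b : Int) :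
    PySem.List.slice (xs.map f) (some a) (some b) = (PySem.List.slice xs (some a) (some b)).map f := by
  simp [PySem.List.slice, List.map_drop, List.map_take]

-- ===== VERDICT (by name: the statement is the Claim_ definition above) =====
theorem message_to_log_spec : Claim_equal_message_to_log := by
  intro wd k _ hpre
  unfold Spec_message_to_log message_to_log message_to_log_alt
  cases wd with
  | none => rfl
  | some d =>
    simp only [PySem.List.foldl_append_singleton_eq_map, List.nil_append]
    have hslice : ∀ i : Int,
        (PySem.List.slice (PySem.Dict.ofList d).items (some i) (some (i + k))).map (fun kv => kv.1 ++ ": " ++ kv.2)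
        = PySem.List.slice ((PySem.Dict.ofList d).items.map (fun kv => kv.1 ++ ": " ++ kv.2)) (some i) (some (i + k)) := by
      intro i; rw [slice_map_comm]
    rcases hpre with h | hk | ⟨hnil, hk0⟩
    · exact absurd h (by simp)
    · -- main case: 1 ≤ k
      have hA : ((PySem.List.pyRange 0 ((PySem.Dict.ofList d).items.length : Int) k).map
          (fun i => PySem.Str.join ", "
            ((PySem.List.slice (PySem.Dict.ofList d).items (some i) (some (i + k))).map (fun kv => kv.1 ++ ": " ++ kv.2))))
          = chunkLines (k.toNat - 1) ((PySem.Dict.ofList d).items.map (fun kv => kv.1 ++ ": " ++ kv.2)) := by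
        have := map_chunks k hk ((PySem.Dict.ofList d).items.map (fun kv => kv.1 ++ ": " ++ kv.2))
        rw [← this, List.length_map]
        apply List.map_congr_left
        intro i _
        rw [hslice]
      rw [hA, ← canon_eq_chunks k hk]
      rcases hL : (PySem.Dict.ofList d).items.map (fun kv => kv.1 ++ ": " ++ kv.2) with _ | ⟨x, rest⟩
      · rw [hL]; simp [PySem.List.enumerate]
      · rw [hL, PySem.List.enumerate_cons, List.foldl_cons]
        simp only [show ((0:Int) == 0) = true from rfl, if_true]
        rw [foldl_enum_sepCat k rest (0+1) x (by omega)]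
        norm_num
    · -- empty dict, k ≠ 0
      cases hnil
      apply String.toList_inj.mp
      simp [PySem.List.pyRange, PySem.Str.toList_join, PySem.Chars.join_nil]
      rfl
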